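-- pv_equiv track=rewrite | github.com/ktouloumis/Skyline-Queries | Preprocess/SkAlgs.py | count
-- ===== SOURCE A (Python) =====
-- def count(ls):
--     #takes a list of 'LS', 'GR', 'EQ'
--     #and returns a dictionary with the values
--     ctEQ = ctGR = ctLS = 0
--     for item in ls:
--         if item == 'LS':
--             ctLS = ctLS+1
--         elif item == 'GR':
--             ctGR = ctGR+1
--         elif item == 'EQ':
--             ctEQ = ctEQ+1
--     dict = {'LS':ctLS, 'GR':ctGR, 'EQ':ctEQ}
--     return dict
-- ===== SOURCE B (Python) =====
-- def count(ls):
--     return {k: ls.count(k) for k in ('LS', 'GR', 'EQ')}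
-- ===== Notes on version B (the rewrite author's own statement) =====
-- stated objective: simpler
-- what changed: Replaces the single branching pass with running counters by a one-line dict comprehension that scans the list once per key with list.count.
import Mathlib
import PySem

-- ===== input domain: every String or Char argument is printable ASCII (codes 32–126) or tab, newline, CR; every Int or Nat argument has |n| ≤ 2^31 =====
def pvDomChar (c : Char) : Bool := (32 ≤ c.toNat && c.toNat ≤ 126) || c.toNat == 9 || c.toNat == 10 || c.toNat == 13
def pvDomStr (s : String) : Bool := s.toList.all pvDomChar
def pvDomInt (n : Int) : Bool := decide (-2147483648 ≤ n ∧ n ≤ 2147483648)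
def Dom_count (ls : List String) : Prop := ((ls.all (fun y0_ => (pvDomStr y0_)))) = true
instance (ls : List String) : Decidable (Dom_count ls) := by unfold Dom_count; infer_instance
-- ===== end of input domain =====

-- B replaces A's single branching pass with three independent list.count scans (objective: simpler).

-- ===== PORT A =====
-- A: one pass maintaining three running counters, then the dict {'LS':ctLS,'GR':ctGR,'EQ':ctEQ}.
def count (ls : List String) : List (String × Int) :=
  let s := ls.foldl
    (fun (st : Int × Int × Int) item =>
      let (ctEQ, ctGR, ctLS) := st
      if item = "LS" then (ctEQ, ctGR, ctLS + 1)
      else if item = "GR" then (ctEQ, ctGR + 1, ctLS)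
      else if item = "EQ" then (ctEQ + 1, ctGR, ctLS)
      else (ctEQ, ctGR, ctLS))
    (0, 0, 0)
  [("LS", s.2.2), ("GR", s.2.1), ("EQ", s.1)]

-- ===== PORT B =====
-- B: {k: ls.count(k) for k in ('LS','GR','EQ')}
def count_alt (ls : List String) : List (String × Int) :=
  ["LS", "GR", "EQ"].map (fun k => (k, (PySem.List.count ls k : Int)))

-- ===== PRECONDITION & SPEC =====
def Spec_count (ls : List String) (out : List (String × Int)) : Prop := out = count_alt ls
instance (ls : List String) (out : List (String × Int)) : Decidable (Spec_count ls out) := by unfold Spec_count; infer_instance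

-- ===== CLAIM (what is proved, stated in full; the proofs are below) =====
def Claim_equal_count : Prop := ∀ (ls : List String), Dom_count ls → Spec_count ls (count ls)

-- ===== LEMMAS AND PROOFS =====
theorem count_foldl_eq (ls : List String) (e g l : Int) :
    ls.foldl
      (fun (st : Int × Int × Int) item =>
        let (ctEQ, ctGR, ctLS) := st
        if item = "LS" then (ctEQ, ctGR, ctLS + 1)
        else if item = "GR" then (ctEQ, ctGR + 1, ctLS)
        else if item = "EQ" then (ctEQ + 1, ctGR, ctLS)
        else (ctEQ, ctGR, ctLS))
      (e, g, l)
    = (e + ls.count "EQ", g + ls.count "GR", l + ls.count "LS") := by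
  induction ls generalizing e g l with
  | nil => simp
  | cons x xs ih =>
    simp only [List.foldl_cons]
    by_cases h1 : x = "LS"
    · subst h1; simp [ih]; omega
    · by_cases h2 : x = "GR"
      · subst h2; simp [ih]; omega
      · by_cases h3 : x = "EQ"
        · subst h3; simp [h1, h2, ih]; omega
        · simp [h1, h2, h3, ih]

-- ===== VERDICT (by name: the statement is the Claim_ definition above) =====
theorem count_spec : Claim_equal_count := by
  intro ls _
  unfold Spec_count count count_alt
  simp [count_foldl_eq, PySem.List.count_eq]
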